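-- pv_equiv track=rewrite | github.com/noicomdien1102/TX_PROJECT | backend/main.py | _run_length_distribution
-- ===== SOURCE A (Python) =====
-- from collections import defaultdict
--
-- def _run_length_distribution(sequence: list[str]) -> dict:
--     if not sequence:
--         return {}
--     dist: dict[int, int] = defaultdict(int)
--     cnt = 1
--     for i in range(1, len(sequence)):
--         if sequence[i] == sequence[i - 1]:
--             cnt += 1
--         else:
--             dist[cnt] += 1
--             cnt = 1
--     dist[cnt] += 1
--     return {str(k): v for k, v in sorted(dist.items())}
-- ===== SOURCE B (Python) =====
-- from collections import Counter
--
--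
-- def _run_length_distribution(sequence: list[str]) -> dict:
--     if not sequence:
--         return {}
--     n = len(sequence)
--     # cut positions: i where a new run starts; edges delimit the runs
--     edges = [0] + [i for i in range(1, n) if sequence[i] != sequence[i - 1]] + [n]
--     lengths = [b - a for a, b in zip(edges, edges[1:])]
--     return {str(k): v for k, v in sorted(Counter(lengths).items())}
-- ===== Notes on version B (the rewrite author's own statement) =====
-- stated objective: alternative
-- what changed: B computes the list of run-boundary positions (indices where the element differs from its predecessor), forms the edge list [0]+boundaries+[n], obtains run lengths as pairwise differences of consecutive edges, and tallies them with Counter, instead of A's fused loop that maintains a running count and pushes it into a defaultdict at each boundary.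
import Mathlib
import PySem

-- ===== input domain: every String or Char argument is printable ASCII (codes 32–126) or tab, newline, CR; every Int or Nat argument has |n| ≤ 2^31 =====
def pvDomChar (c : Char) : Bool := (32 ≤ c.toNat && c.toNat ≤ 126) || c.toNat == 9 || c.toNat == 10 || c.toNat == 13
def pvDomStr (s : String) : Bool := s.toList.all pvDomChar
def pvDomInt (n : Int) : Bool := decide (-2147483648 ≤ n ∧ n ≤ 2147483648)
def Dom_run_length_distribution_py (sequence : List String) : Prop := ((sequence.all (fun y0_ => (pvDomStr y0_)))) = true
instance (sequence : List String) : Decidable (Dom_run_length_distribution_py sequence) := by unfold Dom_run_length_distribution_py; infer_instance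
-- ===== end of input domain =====

-- B computes the list of run-boundary positions and takes pairwise differences of the
-- edge list to get the run lengths, then tallies with Counter, instead of A's fused
-- loop pushing an accumulated count into a defaultdict at each boundary (objective: alternative).

-- ===== PORT A =====
def run_length_distribution_py (sequence : List String) : List (String × Int) :=
  if sequence = [] then []
  else
    -- for i in range(1, len(sequence)): state (dist, cnt)
    let st := (PySem.List.pyRange 1 (sequence.length : Int) 1).foldl
      (fun (st : PySem.Dict Int Int × Int) i =>
        if PySem.List.pyGetD sequence i "" = PySem.List.pyGetD sequence (i - 1) "" then
          (st.1, st.2 + 1)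
        else
          (st.1.modify st.2 0 (· + 1), 1))
      (PySem.Dict.empty, 1)
    let dist := st.1.modify st.2 0 (· + 1)
    -- {str(k): v for k, v in sorted(dist.items())}
    (PySem.List.sorted2 dist.items Prod.fst Prod.snd false).map
      (fun p => (PySem.Int.toStr p.1, p.2))

-- ===== PORT B =====
def run_length_distribution_py_alt (sequence : List String) : List (String × Int) :=
  if sequence = [] then []
  else
    let n : Int := sequence.length
    -- edges = [0] + [i for i in range(1, n) if sequence[i] != sequence[i-1]] + [n]
    let edges : List Int :=
      0 :: ((PySem.List.pyRange 1 n 1).filter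
        (fun i => decide (PySem.List.pyGetD sequence i "" ≠ PySem.List.pyGetD sequence (i - 1) ""))) ++ [n]
    -- lengths = [b - a for a, b in zip(edges, edges[1:])]
    let lengths := List.zipWith (fun a b => b - a) edges edges.tail
    -- {str(k): v for k, v in sorted(Counter(lengths).items())}
    (PySem.List.sorted2 (PySem.Dict.counter lengths).items Prod.fst Prod.snd false).map
      (fun p => (PySem.Int.toStr p.1, p.2))

-- ===== PRECONDITION & SPEC =====
def Spec_run_length_distribution_py (sequence : List String) (out : List (String × Int)) : Prop := out = run_length_distribution_py_alt sequence
instance (sequence : List String) (out : List (String × Int)) : Decidable (Spec_run_length_distribution_py sequence out) := by unfold Spec_run_length_distribution_py; infer_instance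

-- ===== CLAIM (what is proved, stated in full; the proofs are below) =====
def Claim_equal_run_length_distribution_py : Prop := ∀ (sequence : List String), Dom_run_length_distribution_py sequence → Spec_run_length_distribution_py sequence (run_length_distribution_py sequence)

-- ===== LEMMAS AND PROOFS =====

-- proof-only intermediate: the run lengths of prev :: rest given the current run already has length cnt
def pvRunLens : String → Int → List String → List Int
  | _, cnt, [] => [cnt]
  | prev, cnt, y :: ys => if y = prev then pvRunLens y (cnt + 1) ys else cnt :: pvRunLens y 1 ys

theorem pvRunLens_cons_self (prev : String) (c : Int) (t : List String) :
    pvRunLens prev c (prev :: t) = pvRunLens prev (c + 1) t := by simp [pvRunLens]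

theorem pvRunLens_cons_ne {y prev : String} (h : ¬ y = prev) (c : Int) (t : List String) :
    pvRunLens prev c (y :: t) = c :: pvRunLens y 1 t := by simp [pvRunLens, h]

-- A's loop over adjacent indices, finalised with dist[cnt] += 1, tallies the run lengths
theorem pvA_loop (rest : List String) : ∀ (prev : String) (d : PySem.Dict Int Int) (cnt : Int),
    (((List.range rest.length).foldl
        (fun (st : PySem.Dict Int Int × Int) k =>
          if (prev :: rest).getD (k + 1) "" = (prev :: rest).getD k "" then
            (st.1, st.2 + 1)
          else
            (st.1.modify st.2 0 (· + 1), 1))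
        (d, cnt)).1).modify
      (((List.range rest.length).foldl
        (fun (st : PySem.Dict Int Int × Int) k =>
          if (prev :: rest).getD (k + 1) "" = (prev :: rest).getD k "" then
            (st.1, st.2 + 1)
          else
            (st.1.modify st.2 0 (· + 1), 1))
        (d, cnt)).2) 0 (· + 1)
    = (pvRunLens prev cnt rest).foldl (fun d n => d.modify n 0 (· + 1)) d := by
  induction rest with
  | nil => intro prev d cnt; simp [pvRunLens]
  | cons y t ih =>
    intro prev d cnt
    rw [List.length_cons, List.range_succ_eq_map]
    simp only [List.foldl_cons, List.foldl_map, Nat.succ_eq_add_one,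
      List.getD_cons_succ, List.getD_cons_zero, pvRunLens]
    by_cases h : y = prev
    · rw [if_pos h, if_pos h]
      have := ih y d (cnt + 1)
      simp only [List.getD_cons_succ] at this
      exact this
    · rw [if_neg h, if_neg h, List.foldl_cons]
      have := ih y (d.modify cnt 0 (· + 1)) 1
      simp only [List.getD_cons_succ] at this
      exact this

-- proof-only: pairwise differences of an edge list
def pvDiffs (l : List Int) : List Int := List.zipWith (fun a b => b - a) l l.tail

theorem pvDiffs_cons_cons (a b : Int) (l : List Int) :
    pvDiffs (a :: b :: l) = (b - a) :: pvDiffs (b :: l) := rfl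

-- B's edge list, pairwise-differenced, yields the run lengths
theorem pvB_edges (ys : List String) : ∀ (prev : String) (a : Int) (m : Nat),
    pvDiffs (a :: ((List.range ys.length).filter
        (fun k => !((prev :: ys).getD (k + 1) "" = (prev :: ys).getD k "" : Bool))).map
        (fun k => ((m + 1 + k : Nat) : Int)) ++ [((m + 1 + ys.length : Nat) : Int)])
    = pvRunLens prev (((m : Int) + 1) - a) ys := by
  induction ys with
  | nil => intro prev a m; simp [pvRunLens, pvDiffs]
  | cons y t ih =>
    intro prev a m
    rw [List.length_cons, List.range_succ_eq_map, List.filter_cons]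
    simp only [List.getD_cons_succ, List.getD_cons_zero]
    rw [List.filter_map]
    by_cases h : y = prev
    · simp only [h, decide_true, Bool.not_true]
      rw [if_neg (by simp), List.map_map]
      have e1 : ((fun k => ((m + 1 + k : Nat) : Int)) ∘ Nat.succ) = (fun k => ((m + 1 + 1 + k : Nat) : Int)) := by
        funext k; simp only [Function.comp_apply]; push_cast; omega
      have e2 : ((fun k => !decide ((prev :: t).getD k "" = (prev :: prev :: t).getD k "")) ∘ Nat.succ)
          = (fun k => !decide ((prev :: t).getD (k + 1) "" = (prev :: t).getD k "")) := by
        funext k; simp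
      have e3 : (m + 1 + (t.length + 1) : Nat) = (m + 1 + 1 + t.length : Nat) := by omega
      rw [e1, e2, e3, pvRunLens_cons_self]
      have e4 : ((m : Int) + 1 - a + 1) = ((m + 1 : Nat) : Int) + 1 - a := by push_cast; ring
      rw [e4]
      exact ih prev a (m + 1)
    · simp only [h, decide_false, Bool.not_false]
      rw [if_pos (by simp), List.map_cons, List.map_map]
      have e1 : ((fun k => ((m + 1 + k : Nat) : Int)) ∘ Nat.succ) = (fun k => ((m + 1 + 1 + k : Nat) : Int)) := by
        funext k; simp only [Function.comp_apply]; push_cast; omega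
      have e2 : ((fun k => !decide ((y :: t).getD k "" = (prev :: y :: t).getD k "")) ∘ Nat.succ)
          = (fun k => !decide ((y :: t).getD (k + 1) "" = (y :: t).getD k "")) := by
        funext k; simp
      have e3 : (m + 1 + (t.length + 1) : Nat) = (m + 1 + 1 + t.length : Nat) := by omega
      have e5 : ((m + 1 + 0 : Nat) : Int) = ((m + 1 : Nat) : Int) := by norm_num
      rw [e1, e2, e3, e5, pvRunLens_cons_ne h, List.cons_append, List.cons_append,
        pvDiffs_cons_cons, ← List.cons_append]
      have hih := ih y ((m + 1 : Nat) : Int) (m + 1)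
      have e6 : ((m + 1 : Nat) : Int) + 1 - ((m + 1 : Nat) : Int) = 1 := by ring
      rw [e6] at hih
      rw [hih]
      congr 1

theorem run_length_distribution_py_spec_aux (sequence : List String) :
    run_length_distribution_py sequence = run_length_distribution_py_alt sequence := by
  cases sequence with
  | nil => rfl
  | cons x xs =>
    unfold run_length_distribution_py run_length_distribution_py_alt
    simp only [reduceCtorEq, if_neg, not_false_iff]
    have hzip : ∀ l : List Int, List.zipWith (fun a b => b - a) l l.tail = pvDiffs l := fun _ => rfl
    rw [hzip]
    have hlen : ((((x :: xs).length : Int)) - 1).toNat = xs.length := by simp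
    rw [PySem.List.pyRange_one, hlen, List.filter_map]
    have hf : ((fun i => decide (PySem.List.pyGetD (x :: xs) i "" ≠ PySem.List.pyGetD (x :: xs) (i - 1) "")) ∘ (fun k : Nat => (1 : Int) + k))
        = (fun k => !((x :: xs).getD (k + 1) "" = (x :: xs).getD k "" : Bool)) := by
      funext k
      simp only [Function.comp_apply]
      rw [show (1 : Int) + (k : Int) = ((k + 1 : Nat) : Int) by push_cast; ring,
        show ((k + 1 : Nat) : Int) - 1 = ((k : Nat) : Int) by push_cast; ring,
        PySem.List.pyGetD_natCast, PySem.List.pyGetD_natCast]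
      simp [decide_not]
    have hg : (fun k : Nat => (1 : Int) + k) = (fun k : Nat => ((0 + 1 + k : Nat) : Int)) := by
      funext k; push_cast; ring
    rw [hf, hg]
    have hn : ((x :: xs).length : Int) = ((0 + 1 + xs.length : Nat) : Int) := by
      simp [List.length_cons]; ring
    rw [hn]
    have hB := pvB_edges xs x 0 0
    rw [show ((0 : Nat) : Int) + 1 - 0 = 1 by norm_num] at hB
    rw [hB, PySem.Dict.counter_eq_foldl, List.foldl_map]
    have hfun : (fun (st : PySem.Dict Int Int × Int) (k : Nat) =>
        if PySem.List.pyGetD (x :: xs) ((0 + 1 + k : Nat) : Int) "" =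
            PySem.List.pyGetD (x :: xs) (((0 + 1 + k : Nat) : Int) - 1) "" then
          (st.1, st.2 + 1)
        else
          (st.1.modify st.2 0 (· + 1), 1)) =
        (fun (st : PySem.Dict Int Int × Int) (k : Nat) =>
          if (x :: xs).getD (k + 1) "" = (x :: xs).getD k "" then
            (st.1, st.2 + 1)
          else
            (st.1.modify st.2 0 (· + 1), 1)) := by
      funext st k
      rw [show ((0 + 1 + k : Nat) : Int) = ((k + 1 : Nat) : Int) by push_cast; ring,
        show ((k + 1 : Nat) : Int) - 1 = ((k : Nat) : Int) by push_cast; ring,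
        PySem.List.pyGetD_natCast, PySem.List.pyGetD_natCast]
    rw [hfun, pvA_loop xs x PySem.Dict.empty 1]

-- ===== VERDICT (by name: the statement is the Claim_ definition above) =====
theorem run_length_distribution_py_spec : Claim_equal_run_length_distribution_py := by
  intro sequence _
  exact run_length_distribution_py_spec_aux sequence
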